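-- pv_equiv track=rewrite | github.com/omicverse/py-dada2 | pydada2/chimeras.py | _ham_endsfree
-- ===== SOURCE A (Python) =====
-- def _ham_endsfree(a0: str, a1: str) -> int:
--     n = len(a0)
--     i = 0
--     while i < n and (a0[i] == "-" or a1[i] == "-"):
--         i += 1
--     j = n - 1
--     while j > i and (a0[j] == "-" or a1[j] == "-"):
--         j -= 1
--     return sum(1 for k in range(i, j + 1) if a0[k] != a1[k])
-- ===== SOURCE B (Python) =====
-- def _ham_endsfree(a0: str, a1: str) -> int:
--     content = [k for k in range(len(a0)) if a0[k] != "-" and a1[k] != "-"]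
--     if not content:
--         return 0
--     i, j = content[0], content[-1]
--     return sum(1 for k in range(i, j + 1) if a0[k] != a1[k])
-- ===== Notes on version B (the rewrite author's own statement) =====
-- stated objective: alternative
-- what changed: Replaces A's two inward-scanning while loops that locate the trimmed span with a single forward pass collecting the content-column indices (both strings non-gap) and taking the first and last of that list as the span bounds.
import Mathlib
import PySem

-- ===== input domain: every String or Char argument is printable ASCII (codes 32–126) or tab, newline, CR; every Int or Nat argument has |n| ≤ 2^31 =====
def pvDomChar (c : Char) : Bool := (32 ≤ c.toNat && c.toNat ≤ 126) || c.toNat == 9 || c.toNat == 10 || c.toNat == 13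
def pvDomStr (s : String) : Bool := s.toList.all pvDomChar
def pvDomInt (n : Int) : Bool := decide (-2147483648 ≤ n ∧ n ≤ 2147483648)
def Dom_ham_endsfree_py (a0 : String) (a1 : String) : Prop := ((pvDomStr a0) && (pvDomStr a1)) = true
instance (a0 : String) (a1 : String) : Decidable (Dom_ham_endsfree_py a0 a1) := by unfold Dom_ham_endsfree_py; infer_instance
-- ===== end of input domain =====

-- B collects the content-column indices in one forward pass and takes their first/last as the span,
-- instead of A's two inward-scanning while loops; return values only, no mutation.

-- ===== PORT A =====
-- "a0[k] == '-' or a1[k] == '-'": exact for k < both lengths, which Pre_ guarantees for every index read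
def pvGap (l0 l1 : List Char) (k : Nat) : Bool := (l0.getD k ' ' == '-') || (l1.getD k ' ' == '-')

-- "sum(1 for k in range(i, j + 1) if a0[k] != a1[k])" — shared final line of both Pythons
def pvCount (l0 l1 : List Char) (i j : Int) : Int :=
  (PySem.List.pyRange i (j + 1) 1).foldl
    (fun acc k => if l0.getD k.toNat ' ' != l1.getD k.toNat ' ' then acc + 1 else acc) 0

def pvLoopI (l0 l1 : List Char) (n i : Nat) : Nat :=
  if i < n ∧ pvGap l0 l1 i then pvLoopI l0 l1 n (i + 1) else i
termination_by n - i
decreasing_by omega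

def pvLoopJ (l0 l1 : List Char) (i j : Nat) : Nat :=
  if i < j ∧ pvGap l0 l1 j then pvLoopJ l0 l1 i (j - 1) else j
termination_by j
decreasing_by omega

def ham_endsfree_py (a0 : String) (a1 : String) : Int :=
  let l0 := a0.toList
  let l1 := a1.toList
  let n := l0.length
  let i := pvLoopI l0 l1 n 0
  -- Python's j starts at n - 1, which is -1 when n = 0; the Nat-valued loop needs that case split (totalization only)
  let j : Int := if n = 0 then -1 else (pvLoopJ l0 l1 i (n - 1) : Nat)
  pvCount l0 l1 (i : Int) j

-- ===== PORT B =====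
def ham_endsfree_py_alt (a0 : String) (a1 : String) : Int :=
  let l0 := a0.toList
  let l1 := a1.toList
  let content := (List.range l0.length).filter (fun k => !(pvGap l0 l1 k))
  match content with
  | [] => 0
  | i :: rest => pvCount l0 l1 (i : Int) ((rest.getLastD i : Nat) : Int)

-- ===== PRECONDITION & SPEC =====
-- Pre_ is exactly A's return domain: A (and B identically) raises IndexError iff some non-gap
-- column of a0 lies past a1's end; Pre_ excludes precisely those raising inputs.
def Pre_ham_endsfree_py (a0 : String) (a1 : String) : Prop :=
  ∀ k, k < a0.toList.length → a0.toList.getD k ' ' ≠ '-' → k < a1.toList.length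
instance (a0 : String) (a1 : String) : Decidable (Pre_ham_endsfree_py a0 a1) := by
  unfold Pre_ham_endsfree_py; infer_instance

def pvWitness_ham_endsfree_py : String × String := ("-ac-", "-abg")

def Spec_ham_endsfree_py (a0 : String) (a1 : String) (out : Int) : Prop := out = ham_endsfree_py_alt a0 a1
instance (a0 : String) (a1 : String) (out : Int) : Decidable (Spec_ham_endsfree_py a0 a1 out) := by unfold Spec_ham_endsfree_py; infer_instance

-- ===== CLAIM (what is proved, stated in full; the proofs are below) =====
def Claim_equal_ham_endsfree_py : Prop := ∀ (a0 : String) (a1 : String), Dom_ham_endsfree_py a0 a1 → Pre_ham_endsfree_py a0 a1 → Spec_ham_endsfree_py a0 a1 (ham_endsfree_py a0 a1)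

-- ===== LEMMAS AND PROOFS =====

theorem pvLoopI_spec (l0 l1 : List Char) (n i : Nat) :
    i ≤ pvLoopI l0 l1 n i ∧ pvLoopI l0 l1 n i ≤ max i n ∧
    (∀ k, i ≤ k → k < pvLoopI l0 l1 n i → pvGap l0 l1 k = true) ∧
    (pvLoopI l0 l1 n i < n → pvGap l0 l1 (pvLoopI l0 l1 n i) = false) := by
  fun_induction pvLoopI l0 l1 n i with
  | case1 i h ih =>
    obtain ⟨h1, h2, h3, h4⟩ := ih
    refine ⟨by omega, by omega, ?_, h4⟩
    intro k hk1 hk2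
    rcases Nat.eq_or_lt_of_le hk1 with rfl | hlt
    · exact h.2
    · exact h3 k hlt hk2
  | case2 i h =>
    refine ⟨Nat.le_refl _, Nat.le_max_left _ _, ?_, ?_⟩
    · intro k hk1 hk2; omega
    · intro hlt
      rcases Bool.eq_false_or_eq_true (pvGap l0 l1 i) with ht | hf
      · exact absurd ⟨hlt, ht⟩ h
      · exact hf

theorem pvLoopJ_spec (l0 l1 : List Char) (i j : Nat)
    (hg : pvGap l0 l1 i = false) (hij : i ≤ j) :
    i ≤ pvLoopJ l0 l1 i j ∧ pvLoopJ l0 l1 i j ≤ j ∧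
    pvGap l0 l1 (pvLoopJ l0 l1 i j) = false ∧
    (∀ k, pvLoopJ l0 l1 i j < k → k ≤ j → pvGap l0 l1 k = true) := by
  fun_induction pvLoopJ l0 l1 i j with
  | case1 j h ih =>
    obtain ⟨h1, h2, h3, h4⟩ := ih (by omega)
    refine ⟨h1, by omega, h3, ?_⟩
    intro k hk1 hk2
    rcases Nat.eq_or_lt_of_le hk2 with rfl | hlt
    · exact h.2
    · exact h4 k hk1 (by omega)
  | case2 j h =>
    rcases Bool.eq_false_or_eq_true (pvGap l0 l1 j) with ht | hf
    case inr => exact ⟨hij, Nat.le_refl _, hf, fun k hk1 hk2 => by omega⟩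
    case inl =>
      have : ¬ i < j := fun hlt => h ⟨hlt, ht⟩
      have hij' : i = j := by omega
      subst hij'
      exact ⟨Nat.le_refl _, Nat.le_refl _, hg, fun k hk1 hk2 => by omega⟩

theorem pvGetLastD_mem (t : List Nat) (h0 : Nat) : t.getLastD h0 ∈ h0 :: t := by
  induction t generalizing h0 with
  | nil => simp
  | cons a t' ih =>
    rw [List.getLastD_cons]
    exact List.mem_cons_of_mem h0 (ih a)

theorem pvMem_le_getLastD (t : List Nat) (h0 x : Nat)
    (hp : (h0 :: t).Pairwise (· < ·)) (hx : x ∈ h0 :: t) : x ≤ t.getLastD h0 := by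
  induction t generalizing h0 x with
  | nil => simp at hx; simp [hx]
  | cons a t' ih =>
    have hp' : (a :: t').Pairwise (· < ·) := (List.pairwise_cons.mp hp).2
    rw [List.getLastD_cons]
    rcases List.mem_cons.mp hx with rfl | hx'
    · have h0a : x < a := (List.pairwise_cons.mp hp).1 a (List.mem_cons_self)
      have := ih a a hp' (List.mem_cons_self)
      omega
    · exact ih a x hp' hx'

theorem pvFilterRange_pairwise (p : Nat → Bool) (n : Nat) :
    ((List.range n).filter p).Pairwise (· < ·) :=
  (List.pairwise_lt_range).filter p

theorem pvFilterRange_nil (p : Nat → Bool) (n : Nat)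
    (h : (List.range n).filter p = []) : ∀ k, k < n → p k = false := by
  intro k hk
  have := List.filter_eq_nil_iff.mp h k (List.mem_range.mpr hk)
  simpa using this

theorem pvFilterRange_cons (p : Nat → Bool) (n h0 : Nat) (t : List Nat)
    (h : (List.range n).filter p = h0 :: t) :
    p h0 = true ∧ h0 < n ∧ (∀ k, k < h0 → p k = false) := by
  have hpair := pvFilterRange_pairwise p n
  rw [h] at hpair
  have hmem : h0 ∈ (List.range n).filter p := by rw [h]; exact List.mem_cons_self
  obtain ⟨hr, hp0⟩ := List.mem_filter.mp hmem
  refine ⟨hp0, List.mem_range.mp hr, ?_⟩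
  intro k hk
  by_contra hkp
  have hkp' : p k = true := by simpa using hkp
  have hkn : k < n := by have := List.mem_range.mp hr; omega
  have hkmem : k ∈ h0 :: t := by
    rw [← h]; exact List.mem_filter.mpr ⟨List.mem_range.mpr hkn, hkp'⟩
  rcases List.mem_cons.mp hkmem with rfl | hkt
  · omega
  · have := (List.pairwise_cons.mp hpair).1 k hkt; omega

theorem pvFilterRange_last (p : Nat → Bool) (n h0 : Nat) (t : List Nat)
    (h : (List.range n).filter p = h0 :: t) :
    p (t.getLastD h0) = true ∧ h0 ≤ t.getLastD h0 ∧ t.getLastD h0 < n ∧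
    (∀ k, t.getLastD h0 < k → k < n → p k = false) := by
  have hpair := pvFilterRange_pairwise p n
  rw [h] at hpair
  have hLmem : t.getLastD h0 ∈ (List.range n).filter p := by
    rw [h]; exact pvGetLastD_mem t h0
  obtain ⟨hr, hpL⟩ := List.mem_filter.mp hLmem
  have hLn : t.getLastD h0 < n := List.mem_range.mp hr
  have hmin := (pvFilterRange_cons p n h0 t h).2.2
  have hh0L : h0 ≤ t.getLastD h0 := by
    by_contra hc
    have := hmin (t.getLastD h0) (by omega)
    rw [this] at hpL; exact absurd hpL (by simp)
  refine ⟨hpL, hh0L, hLn, ?_⟩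
  intro k hk1 hk2
  by_contra hkp
  have hkp' : p k = true := by simpa using hkp
  have hkmem : k ∈ h0 :: t := by
    rw [← h]; exact List.mem_filter.mpr ⟨List.mem_range.mpr hk2, hkp'⟩
  have := pvMem_le_getLastD t h0 k hpair hkmem
  omega

-- ===== VERDICT (by name: the statement is the Claim_ definition above) =====
theorem ham_endsfree_py_spec : Claim_equal_ham_endsfree_py := by
  intro a0 a1 _ hpre
  unfold Spec_ham_endsfree_py ham_endsfree_py ham_endsfree_py_alt
  dsimp only
  set l0 := a0.toList with hl0
  set l1 := a1.toList with hl1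
  set n := l0.length with hn
  cases hC : (List.range n).filter (fun k => !(pvGap l0 l1 k)) with
  | nil =>
    have hall : ∀ k, k < n → pvGap l0 l1 k = true := by
      intro k hk
      have := pvFilterRange_nil _ n hC k hk
      simpa using this
    obtain ⟨hI1, hI2, hI3, hI4⟩ := pvLoopI_spec l0 l1 n 0
    have hIn : pvLoopI l0 l1 n 0 = n := by
      by_contra hne
      have hlt : pvLoopI l0 l1 n 0 < n := by omega
      rw [hall _ hlt] at hI4
      exact absurd (hI4 hlt) (by simp)
    rw [hIn]
    by_cases h0 : n = 0
    · rw [if_pos h0, h0]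
      unfold pvCount
      rw [PySem.List.pyRange_one_eq_nil (by omega)]
      rfl
    · rw [if_neg h0]
      rw [pvLoopJ]
      rw [if_neg (by omega)]
      unfold pvCount
      rw [PySem.List.pyRange_one_eq_nil (by omega)]
      rfl
  | cons h0 t =>
    obtain ⟨hp0, hh0n, hmin⟩ := pvFilterRange_cons _ n h0 t hC
    have hg0 : pvGap l0 l1 h0 = false := by simpa using hp0
    have hming : ∀ k, k < h0 → pvGap l0 l1 k = true := by
      intro k hk
      have := hmin k hk
      simpa using this
    obtain ⟨hI1, hI2, hI3, hI4⟩ := pvLoopI_spec l0 l1 n 0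
    have hIeq : pvLoopI l0 l1 n 0 = h0 := by
      by_contra hne
      rcases Nat.lt_or_ge (pvLoopI l0 l1 n 0) h0 with hlt | hge
      · have h4 := hI4 (by omega)
        rw [hming _ hlt] at h4
        exact absurd h4 (by simp)
      · have hlt : h0 < pvLoopI l0 l1 n 0 := by omega
        have := hI3 h0 (by omega) hlt
        rw [hg0] at this
        exact absurd this (by simp)
    obtain ⟨hpL, hh0L, hLn, hmax⟩ := pvFilterRange_last _ n h0 t hC
    have hgL : pvGap l0 l1 (t.getLastD h0) = false := by simpa using hpL
    have hmaxg : ∀ k, t.getLastD h0 < k → k < n → pvGap l0 l1 k = true := by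
      intro k hk1 hk2
      have := hmax k hk1 hk2
      simpa using this
    obtain ⟨hJ1, hJ2, hJ3, hJ4⟩ := pvLoopJ_spec l0 l1 h0 (n - 1) hg0 (by omega)
    have hJeq : pvLoopJ l0 l1 h0 (n - 1) = t.getLastD h0 := by
      by_contra hne
      rcases Nat.lt_or_ge (pvLoopJ l0 l1 h0 (n - 1)) (t.getLastD h0) with hlt | hge
      · have := hJ4 (t.getLastD h0) hlt (by omega)
        rw [hgL] at this
        exact absurd this (by simp)
      · have hlt : t.getLastD h0 < pvLoopJ l0 l1 h0 (n - 1) := by omega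
        have := hmaxg _ hlt (by omega)
        rw [hJ3] at this
        exact absurd this (by simp)
    rw [hIeq, if_neg (by omega), hJeq]
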